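-- pv_equiv track=rewrite | github.com/ppquadrat/musparql-aligner | enrich_evidence.py | extract_pdf_paragraphs
-- ===== SOURCE A (Python) =====
-- from typing import Dict, Iterable, List, Optional, Tuple
--
-- def extract_pdf_paragraphs(lines: List[str], start_idx: int, max_paragraphs: int = 2) -> Optional[str]:
--     if start_idx <= 0:
--         return None
--     paragraphs: List[str] = []
--     current: List[str] = []
--     i = start_idx - 1
--     while i >= 0 and len(paragraphs) < max_paragraphs:
--         line = lines[i].strip()
--         if not line:
--             if current:
--                 paragraphs.append(" ".join(reversed(current)).strip())
--                 current = []
--             i -= 1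
--             continue
--         current.append(line)
--         i -= 1
--     if current and len(paragraphs) < max_paragraphs:
--         paragraphs.append(" ".join(reversed(current)).strip())
--     if not paragraphs:
--         # Fallback: capture up to two non-empty lines above.
--         fallback: List[str] = []
--         i = start_idx - 1
--         while i >= 0 and len(fallback) < 2:
--             line = lines[i].strip()
--             if line:
--                 fallback.append(line)
--             i -= 1
--         if not fallback:
--             return None
--         fallback.reverse()
--         return "\n".join(fallback).strip()
--     paragraphs.reverse()
--     return "\n\n".join(paragraphs).strip()
-- ===== SOURCE B (Python) =====
-- from typing import List, Optional
--
-- def extract_pdf_paragraphs(lines: List[str], start_idx: int, max_paragraphs: int = 2) -> Optional[str]: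
--     if start_idx <= 0:
--         return None
--     stripped = [lines[i].strip() for i in range(start_idx)]
--     paragraphs: List[str] = []
--     current: List[str] = []
--     for s in stripped:
--         if s:
--             current.append(s)
--         elif current:
--             paragraphs.append(" ".join(current).strip())
--             current = []
--     if current:
--         paragraphs.append(" ".join(current).strip())
--     if max_paragraphs >= 1 and paragraphs:
--         return "\n\n".join(paragraphs[-max_paragraphs:]).strip()
--     tail = [s for s in stripped if s][-2:]
--     return "\n".join(tail).strip() if tail else None
-- ===== Notes on version B (the rewrite author's own statement) =====
-- stated objective: alternative
-- what changed: B replaces A's backward index-walk (paragraphs built nearest-first with per-paragraph word reversal, then reversed again, plus a second backward fallback scan) by one forward pass over the stripped prefix that accumulates all paragraphs in order and slices off the last max_paragraphs; the fallback reuses the already-stripped list instead of rescanning.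
import Mathlib
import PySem

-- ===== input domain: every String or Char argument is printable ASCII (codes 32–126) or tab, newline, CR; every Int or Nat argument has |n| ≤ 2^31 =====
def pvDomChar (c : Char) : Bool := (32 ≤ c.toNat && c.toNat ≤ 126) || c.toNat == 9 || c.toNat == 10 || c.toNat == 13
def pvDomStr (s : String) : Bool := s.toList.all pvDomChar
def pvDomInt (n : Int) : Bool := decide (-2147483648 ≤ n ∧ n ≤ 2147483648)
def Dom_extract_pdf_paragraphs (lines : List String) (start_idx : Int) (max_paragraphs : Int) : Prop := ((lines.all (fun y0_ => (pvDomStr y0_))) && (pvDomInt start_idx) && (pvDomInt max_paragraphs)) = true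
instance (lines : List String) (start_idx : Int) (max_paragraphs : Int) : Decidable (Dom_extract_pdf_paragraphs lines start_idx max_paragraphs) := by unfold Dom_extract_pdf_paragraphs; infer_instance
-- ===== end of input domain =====

-- B replaces A's backward index scan by a single forward pass over the stripped prefix
-- (flush-on-blank paragraph accumulation) followed by a last-k slice: alternative decomposition, same cost.


-- ===== PORT A =====
-- A's main while loop: state (paragraphs, current); the Nat argument is i+1 for the current
-- Int index i (so 0 is i = -1, i.e. 'i >= 0' fails), giving the same backward index walk.
def pvLoopA (lines : List String) (maxp : Int) (paragraphs current : List String) : Nat → List String × List String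
  | 0 => (paragraphs, current)
  | k + 1 =>
    if (paragraphs.length : Int) < maxp then
      let line := PySem.Str.strip (PySem.List.pyGetD lines (k : Int) "")
      if line = "" then
        if current ≠ [] then
          pvLoopA lines maxp (paragraphs ++ [PySem.Str.strip (PySem.Str.join " " current.reverse)]) [] k
        else pvLoopA lines maxp paragraphs current k
      else pvLoopA lines maxp paragraphs (current ++ [line]) k
    else (paragraphs, current)

-- A's fallback while loop collecting up to two non-blank stripped lines going down (same Nat index convention).
def pvLoopF (lines : List String) (fallback : List String) : Nat → List String
  | 0 => fallback
  | k + 1 =>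
    if fallback.length < 2 then
      let line := PySem.Str.strip (PySem.List.pyGetD lines (k : Int) "")
      if line = "" then pvLoopF lines fallback k
      else pvLoopF lines (fallback ++ [line]) k
    else fallback

def extract_pdf_paragraphs (lines : List String) (start_idx : Int) (max_paragraphs : Int) : Option String :=
  if start_idx ≤ 0 then none
  else
    let pc := pvLoopA lines max_paragraphs [] [] start_idx.toNat
    let paragraphs :=
      if pc.2 ≠ [] ∧ (pc.1.length : Int) < max_paragraphs
      then pc.1 ++ [PySem.Str.strip (PySem.Str.join " " pc.2.reverse)]
      else pc.1
    if paragraphs = [] then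
      let fallback := pvLoopF lines [] start_idx.toNat
      if fallback = [] then none
      else some (PySem.Str.strip (PySem.Str.join "\n" fallback.reverse))
    else some (PySem.Str.strip (PySem.Str.join "\n\n" paragraphs.reverse))

-- ===== PORT B =====
-- B's loop body: append a non-blank line to the current run, flush the run on a blank line.
def pvStepB (acc : List String × List String) (s : String) : List String × List String :=
  if s ≠ "" then (acc.1, acc.2 ++ [s])
  else if acc.2 ≠ [] then (acc.1 ++ [PySem.Str.strip (PySem.Str.join " " acc.2)], [])
  else acc

def extract_pdf_paragraphs_alt (lines : List String) (start_idx : Int) (max_paragraphs : Int) : Option String :=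
  if start_idx ≤ 0 then none
  else
    let stripped := (PySem.List.pyRange 0 start_idx 1).map (fun i => PySem.Str.strip (PySem.List.pyGetD lines i ""))
    let pc := stripped.foldl pvStepB ([], [])
    let paragraphs := if pc.2 ≠ [] then pc.1 ++ [PySem.Str.strip (PySem.Str.join " " pc.2)] else pc.1
    if 1 ≤ max_paragraphs ∧ paragraphs ≠ [] then
      some (PySem.Str.strip (PySem.Str.join "\n\n" (PySem.List.slice paragraphs (some (-max_paragraphs)) none)))
    else
      let tail := PySem.List.slice (stripped.filter (· ≠ "")) (some (-2)) none
      if tail ≠ [] then some (PySem.Str.strip (PySem.Str.join "\n" tail)) else none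

-- ===== PRECONDITION & SPEC =====
-- Pre_ excludes exactly the inputs where both programs raise IndexError: 0 < start_idx > len(lines).
def Pre_extract_pdf_paragraphs (lines : List String) (start_idx : Int) (max_paragraphs : Int) : Prop :=
  start_idx ≤ (lines.length : Int)
instance (lines : List String) (start_idx : Int) (max_paragraphs : Int) : Decidable (Pre_extract_pdf_paragraphs lines start_idx max_paragraphs) := by unfold Pre_extract_pdf_paragraphs; infer_instance

def pvWitness_extract_pdf_paragraphs : List String × Int × Int := (["a"], 1, 1)

def Spec_extract_pdf_paragraphs (lines : List String) (start_idx : Int) (max_paragraphs : Int) (out : Option String) : Prop := out = extract_pdf_paragraphs_alt lines start_idx max_paragraphs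
instance (lines : List String) (start_idx : Int) (max_paragraphs : Int) (out : Option String) : Decidable (Spec_extract_pdf_paragraphs lines start_idx max_paragraphs out) := by unfold Spec_extract_pdf_paragraphs; infer_instance

-- ===== CLAIM (what is proved, stated in full; the proofs are below) =====
def Claim_equal_extract_pdf_paragraphs : Prop := ∀ (lines : List String) (start_idx : Int) (max_paragraphs : Int), Dom_extract_pdf_paragraphs lines start_idx max_paragraphs → Pre_extract_pdf_paragraphs lines start_idx max_paragraphs → Spec_extract_pdf_paragraphs lines start_idx max_paragraphs (extract_pdf_paragraphs lines start_idx max_paragraphs)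

-- ===== LEMMAS AND PROOFS =====

-- list-level restatement of A's main loop, processing the reversed stripped prefix front-to-back
def pvLoopRev (maxp : Int) : List String → List String → List String → List String × List String
  | [], p, c => (p, c)
  | s :: rest, p, c =>
    if (p.length : Int) < maxp then
      if s = "" then
        if c ≠ [] then pvLoopRev maxp rest (p ++ [PySem.Str.strip (PySem.Str.join " " c.reverse)]) []
        else pvLoopRev maxp rest p c
      else pvLoopRev maxp rest p (c ++ [s])
    else (p, c)

-- the same loop without the max_paragraphs cap
def pvLoopRevN : List String → List String → List String → List String × List String
  | [], p, c => (p, c)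
  | s :: rest, p, c =>
    if s = "" then
      if c ≠ [] then pvLoopRevN rest (p ++ [PySem.Str.strip (PySem.Str.join " " c.reverse)]) []
      else pvLoopRevN rest p c
    else pvLoopRevN rest p (c ++ [s])

-- list-level restatement of A's fallback loop
def pvLoopFRev : List String → List String → List String
  | [], f => f
  | s :: rest, f =>
    if f.length < 2 then (if s = "" then pvLoopFRev rest f else pvLoopFRev rest (f ++ [s]))
    else f

def pvFlushN (pc : List String × List String) : List String :=
  if pc.2 ≠ [] then pc.1 ++ [PySem.Str.strip (PySem.Str.join " " pc.2.reverse)] else pc.1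

def pvFlushB (pc : List String × List String) : List String :=
  if pc.2 ≠ [] then pc.1 ++ [PySem.Str.strip (PySem.Str.join " " pc.2)] else pc.1

def pvSplitB (S : List String) : List String := pvFlushB (S.foldl pvStepB ([], []))

def pvRevS (lines : List String) (n : Nat) : List String :=
  ((lines.take n).map PySem.Str.strip).reverse

theorem pvStepB_blank (pc : List String × List String) :
    pvStepB pc "" = (pvFlushB pc, []) := by
  obtain ⟨a, b⟩ := pc
  by_cases hb : b = [] <;> simp [pvStepB, pvFlushB, hb]

theorem pvFlushB_append (a b c : List String) :
    pvFlushB (a ++ b, c) = a ++ pvFlushB (b, c) := by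
  by_cases hc : c = [] <;> simp [pvFlushB, hc]

theorem pvFlushN_append (a b c : List String) :
    pvFlushN (a ++ b, c) = a ++ pvFlushN (b, c) := by
  by_cases hc : c = [] <;> simp [pvFlushN, hc]

theorem pvRevS_zero (lines : List String) : pvRevS lines 0 = [] := by
  simp [pvRevS]

theorem pvRevS_succ (lines : List String) (n : Nat) (hn : n < lines.length) :
    pvRevS lines (n + 1) = PySem.Str.strip lines[n] :: pvRevS lines n := by
  have h1 : lines.take (n + 1) = lines.take n ++ [lines[n]] := by
    rw [List.take_add_one, List.getElem?_eq_getElem hn]; simp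
  unfold pvRevS
  rw [h1]
  simp only [List.map_append, List.map_cons, List.map_nil, List.reverse_append,
    List.reverse_cons, List.reverse_nil, List.nil_append, List.singleton_append]

theorem pvloopA_eq_rev (lines : List String) (maxp : Int) (n : Nat) (hn : n ≤ lines.length) :
    ∀ p c, pvLoopA lines maxp p c n = pvLoopRev maxp (pvRevS lines n) p c := by
  induction n with
  | zero =>
    intro p c
    rw [pvRevS_zero]
    simp [pvLoopA, pvLoopRev]
  | succ n ih =>
    intro p c
    have hlt : n < lines.length := by omega
    have hget : PySem.List.pyGetD lines ((n : Int)) "" = lines[n] := by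
      rw [PySem.List.pyGetD_natCast]
      exact List.getD_eq_getElem lines "" hlt
    rw [pvRevS_succ lines n hlt]
    by_cases hm : (p.length : Int) < maxp
    · simp only [pvLoopA, hget, pvLoopRev, if_pos hm]
      by_cases hb : PySem.Str.strip lines[n] = ""
      · simp only [if_pos hb]
        by_cases hcur : c ≠ []
        · simp only [if_pos hcur]
          exact ih (by omega) (p ++ [PySem.Str.strip (PySem.Str.join " " c.reverse)]) []
        · simp only [if_neg hcur]
          exact ih (by omega) p c
      · simp only [if_neg hb]
        exact ih (by omega) p (c ++ [PySem.Str.strip lines[n]])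
    · simp [pvLoopA, pvLoopRev, hm]

theorem pvloopF_eq_rev (lines : List String) (n : Nat) (hn : n ≤ lines.length) :
    ∀ f, pvLoopF lines f n = pvLoopFRev (pvRevS lines n) f := by
  induction n with
  | zero =>
    intro f
    rw [pvRevS_zero]
    simp [pvLoopF, pvLoopFRev]
  | succ n ih =>
    intro f
    have hlt : n < lines.length := by omega
    have hget : PySem.List.pyGetD lines ((n : Int)) "" = lines[n] := by
      rw [PySem.List.pyGetD_natCast]
      exact List.getD_eq_getElem lines "" hlt
    rw [pvRevS_succ lines n hlt]
    by_cases hm : f.length < 2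
    · simp only [pvLoopF, hget, pvLoopFRev, if_pos hm]
      by_cases hb : PySem.Str.strip lines[n] = ""
      · simp only [if_pos hb]
        exact ih (by omega) f
      · simp only [if_neg hb]
        exact ih (by omega) (f ++ [PySem.Str.strip lines[n]])
    · simp [pvLoopF, pvLoopFRev, hm]

theorem pvloopFRev_spec (L : List String) :
    ∀ f, f.length ≤ 2 → pvLoopFRev L f = f ++ (L.filter (· ≠ "")).take (2 - f.length) := by
  induction L with
  | nil => intro f hf; simp [pvLoopFRev]
  | cons s rest ih =>
    intro f hf
    by_cases h2 : f.length < 2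
    · by_cases hs : s = ""
      · subst hs; simp [pvLoopFRev, h2, ih f hf]
      · have hlen : (f ++ [s]).length ≤ 2 := by
          simp only [List.length_append, List.length_cons, List.length_nil]; omega
        have h21 : 2 - (f ++ [s]).length = 1 - f.length := by
          simp only [List.length_append, List.length_cons, List.length_nil]; omega
        have h22 : 2 - f.length = (1 - f.length) + 1 := by omega
        simp only [pvLoopFRev, if_pos h2, if_neg hs, ih (f ++ [s]) hlen, h21]
        simp [hs, h22]
    · have : f.length = 2 := by omega
      simp [pvLoopFRev, this]

theorem pvloopRevN_prefix (L : List String) :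
    ∀ p c, pvLoopRevN L p c = (p ++ (pvLoopRevN L [] c).1, (pvLoopRevN L [] c).2) := by
  induction L with
  | nil => intro p c; simp [pvLoopRevN]
  | cons s rest ih =>
    intro p c
    by_cases hs : s = ""
    · subst hs
      by_cases hc : c = []
      · subst hc; simp only [pvLoopRevN]; simp
        exact ih p []
      · simp only [pvLoopRevN]
        simp [hc, ih (p ++ [PySem.Str.strip (PySem.Str.join " " c.reverse)]) [],
          ih [PySem.Str.strip (PySem.Str.join " " c.reverse)] []]
    · simp only [pvLoopRevN, if_neg hs]
      rw [ih p (c ++ [s]), ih [] (c ++ [s])]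

theorem pvcap (maxp : Int) (hm : 0 ≤ maxp) (L : List String) :
    ∀ p c, (p.length : Int) ≤ maxp →
      (let pc := pvLoopRev maxp L p c
       if pc.2 ≠ [] ∧ (pc.1.length : Int) < maxp
       then pc.1 ++ [PySem.Str.strip (PySem.Str.join " " pc.2.reverse)] else pc.1)
      = (pvFlushN (pvLoopRevN L p c)).take maxp.toNat := by
  induction L with
  | nil =>
    intro p c hp
    simp only [pvLoopRev, pvLoopRevN, pvFlushN]
    by_cases hc : c = []
    · simp [hc, List.take_of_length_le (show p.length ≤ maxp.toNat by omega)]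
    · by_cases hlt : (p.length : Int) < maxp
      · have : (p ++ [PySem.Str.strip (PySem.Str.join " " c.reverse)]).length ≤ maxp.toNat := by
          simp only [List.length_append, List.length_cons, List.length_nil]; omega
        simp [hc, hlt, List.take_of_length_le this]
      · have hk : maxp.toNat = p.length := by omega
        simp [hc, hlt, hk]
  | cons s rest ih =>
    intro p c hp
    by_cases hlt : (p.length : Int) < maxp
    · by_cases hs : s = ""
      · subst hs
        by_cases hc : c = []
        · subst hc
          simp only [pvLoopRev, pvLoopRevN, if_pos hlt]
          simpa using ih p [] hp
        · simp only [pvLoopRev, pvLoopRevN, if_pos hlt]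
          have hlen : ((p ++ [PySem.Str.strip (PySem.Str.join " " c.reverse)]).length : Int) ≤ maxp := by
            simp only [List.length_append, List.length_cons, List.length_nil]
            push_cast; omega
          simpa [hc] using ih (p ++ [PySem.Str.strip (PySem.Str.join " " c.reverse)]) [] hlen
      · simp only [pvLoopRev, pvLoopRevN, if_pos hlt, if_neg hs]
        exact ih p (c ++ [s]) hp
    · have hk : maxp.toNat = p.length := by omega
      simp only [pvLoopRev, if_neg hlt]
      rw [pvloopRevN_prefix (s :: rest) p c, pvFlushN_append]
      simp [hlt, hk]

theorem pvstepB_prefix (S : List String) :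
    ∀ p c, S.foldl pvStepB (p, c) = (p ++ (S.foldl pvStepB ([], c)).1, (S.foldl pvStepB ([], c)).2) := by
  induction S with
  | nil => intro p c; simp
  | cons s rest ih =>
    intro p c
    rw [List.foldl_cons, List.foldl_cons]
    by_cases hs : s = ""
    · subst hs
      by_cases hc : c = []
      · subst hc; simp only [pvStepB]; simp
        exact ih p []
      · simp only [pvStepB]
        simp [hc, ih (p ++ [PySem.Str.strip (PySem.Str.join " " c)]) [],
          ih [PySem.Str.strip (PySem.Str.join " " c)] []]
    · simp only [pvStepB, if_pos hs]
      rw [ih p (c ++ [s]), ih [] (c ++ [s])]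

theorem pvstepB_nonblank (Y : List String) :
    ∀ p c, "" ∉ Y → Y.foldl pvStepB (p, c) = (p, c ++ Y) := by
  induction Y with
  | nil => intro p c _; simp
  | cons y ys ih =>
    intro p c hY
    have hy : y ≠ "" := fun h => hY (by simp [h])
    have hys : "" ∉ ys := fun h => hY (by simp [h])
    rw [List.foldl_cons]
    simp only [pvStepB, if_pos hy, ih p (c ++ [y]) hys]
    simp

theorem pvsplitB_append_blank (X Y : List String) :
    pvSplitB (X ++ "" :: Y) = pvSplitB X ++ pvSplitB Y := by
  unfold pvSplitB
  rw [show X ++ "" :: Y = (X ++ [""]) ++ Y from by simp, List.foldl_append, List.foldl_append,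
      List.foldl_cons, List.foldl_nil, pvStepB_blank]
  rw [pvstepB_prefix Y (pvFlushB (X.foldl pvStepB ([], []))) []]
  rw [pvFlushB_append]

theorem pvsplitB_nonblank (Y : List String) (hY : "" ∉ Y) (hne : Y ≠ []) :
    pvSplitB Y = [PySem.Str.strip (PySem.Str.join " " Y)] := by
  unfold pvSplitB
  rw [pvstepB_nonblank Y [] [] hY]
  simp [pvFlushB, hne]

theorem pvN_eq_split (L : List String) :
    ∀ p c, "" ∉ c → pvFlushN (pvLoopRevN L p c) = p ++ (pvSplitB (L.reverse ++ c.reverse)).reverse := by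
  induction L with
  | nil =>
    intro p c hc
    by_cases hcn : c = []
    · subst hcn; simp [pvLoopRevN, pvFlushN, pvSplitB, pvFlushB]
    · have h1 : "" ∉ c.reverse := by simpa using hc
      have h2 : c.reverse ≠ [] := by simpa using hcn
      simp only [pvLoopRevN, pvFlushN, List.reverse_nil, List.nil_append]
      rw [pvsplitB_nonblank c.reverse h1 h2]
      simp [hcn]
  | cons s rest ih =>
    intro p c hc
    by_cases hs : s = ""
    · by_cases hcn : c = []
      · subst hcn
        simp only [pvLoopRevN, if_pos hs]
        rw [if_neg (by simp : ¬([] : List String) ≠ [])]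
        rw [ih p [] (by simp)]
        have heq : (s :: rest).reverse ++ ([] : List String).reverse = rest.reverse ++ "" :: [] := by
          simp [hs]
        rw [heq, pvsplitB_append_blank rest.reverse []]
        simp [pvSplitB, pvFlushB]
      · have h1 : "" ∉ c.reverse := by simpa using hc
        have h2 : c.reverse ≠ [] := by simpa using hcn
        simp only [pvLoopRevN, if_pos hs]
        rw [if_pos hcn]
        rw [ih (p ++ [PySem.Str.strip (PySem.Str.join " " c.reverse)]) [] (by simp)]
        have heq : (s :: rest).reverse ++ c.reverse = rest.reverse ++ "" :: c.reverse := by simp [hs]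
        rw [heq, pvsplitB_append_blank rest.reverse c.reverse, pvsplitB_nonblank c.reverse h1 h2]
        simp
    · simp only [pvLoopRevN, if_neg hs]
      rw [ih p (c ++ [s]) (by
        intro h
        rcases List.mem_append.mp h with h | h
        · exact hc h
        · simp at h; exact hs h)]
      have heq : (s :: rest).reverse ++ c.reverse = rest.reverse ++ (c ++ [s]).reverse := by simp
      rw [heq]

theorem pvtake_reverse (R : List String) (k : Nat) :
    (R.reverse.take k).reverse = R.drop (R.length - k) := by
  rw [List.take_reverse, List.reverse_reverse]

theorem pvstripped_eq (lines : List String) (n : Nat) (hn : n ≤ lines.length) :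
    (PySem.List.pyRange 0 (n : Int) 1).map (fun i => PySem.Str.strip (PySem.List.pyGetD lines i ""))
      = (lines.take n).map PySem.Str.strip := by
  rw [PySem.List.pyRange_one]
  have h0 : ((n : Int) - 0).toNat = n := by omega
  rw [h0, List.map_map]
  apply List.ext_getElem
  · simp [Nat.min_eq_left hn]
  · intro i h1 h2
    have hil : i < lines.length := by simp at h1; omega
    simp [PySem.List.pyGetD_natCast, List.getElem?_eq_getElem hil]

theorem pvaltB (S : List String) :
    (if (List.foldl pvStepB ([], []) S).2 ≠ [] then
        (List.foldl pvStepB ([], []) S).1 ++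
          [PySem.Str.strip (PySem.Str.join " " (List.foldl pvStepB ([], []) S).2)]
      else (List.foldl pvStepB ([], []) S).1) = pvSplitB S := rfl

theorem pvLoopRev_nonpos (maxp : Int) (hm : ¬ 1 ≤ maxp) (L : List String) :
    pvLoopRev maxp L [] [] = ([], []) := by
  cases L with
  | nil => simp [pvLoopRev]
  | cons a l =>
    simp only [pvLoopRev]
    rw [if_neg (by simp; omega)]

theorem pvfallback_eq (lines : List String) (n : Nat) (hn : n ≤ lines.length) :
    (let fb := pvLoopF lines [] n
     if fb = [] then none
     else some (PySem.Str.strip (PySem.Str.join "\n" fb.reverse)))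
    = (let tail := PySem.List.slice (((lines.take n).map PySem.Str.strip).filter (· ≠ "")) (some (-2)) none
       if tail ≠ [] then some (PySem.Str.strip (PySem.Str.join "\n" tail)) else none) := by
  simp only []
  rw [pvloopF_eq_rev lines n hn [], pvloopFRev_spec (pvRevS lines n) [] (by simp)]
  have hrev : (pvRevS lines n).filter (· ≠ "")
      = (((lines.take n).map PySem.Str.strip).filter (· ≠ "")).reverse := by
    unfold pvRevS; rw [List.filter_reverse]
  rw [hrev, PySem.List.slice_from_neg_ofNat _ 2 (by norm_num)]
  set F := ((lines.take n).map PySem.Str.strip).filter (· ≠ "") with hF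
  by_cases hFe : F = []
  · simp [hFe]
  · have hfb : ([] : List String) ++ F.reverse.take (2 - List.length ([] : List String)) ≠ [] := by
      simp [List.take_eq_nil_iff, hFe]
    have htail : F.drop (F.length - 2) ≠ [] := by
      rw [Ne, List.drop_eq_nil_iff]
      have : 0 < F.length := List.length_pos_of_ne_nil hFe
      omega
    rw [if_neg (by simpa using hfb), if_pos htail]
    rw [show ([] : List String) ++ F.reverse.take (2 - List.length ([] : List String)) = F.reverse.take 2 from by simp]
    rw [pvtake_reverse F 2]

-- ===== VERDICT (by name: the statement is the Claim_ definition above) =====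
theorem extract_pdf_paragraphs_spec : Claim_equal_extract_pdf_paragraphs := by
  intro lines start_idx maxp _ hpre
  unfold Pre_extract_pdf_paragraphs at hpre
  unfold Spec_extract_pdf_paragraphs
  by_cases h0 : start_idx ≤ 0
  · simp [extract_pdf_paragraphs, extract_pdf_paragraphs_alt, h0]
  · obtain ⟨n, rfl⟩ : ∃ n : Nat, start_idx = (n : Int) := ⟨start_idx.toNat, by omega⟩
    have hn : n ≤ lines.length := by exact_mod_cast hpre
    have hnpos : 0 < n := by omega
    simp only [extract_pdf_paragraphs, extract_pdf_paragraphs_alt, if_neg h0, Int.toNat_natCast]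
    rw [pvstripped_eq lines n hn]
    rw [pvloopA_eq_rev lines maxp n hn [] [], pvaltB]
    set S := List.map PySem.Str.strip (List.take n lines) with hS
    have hLrev : (pvRevS lines n).reverse = S := by
      unfold pvRevS; rw [List.reverse_reverse, hS]
    have hsplit : pvFlushN (pvLoopRevN (pvRevS lines n) [] []) = (pvSplitB S).reverse := by
      rw [pvN_eq_split (pvRevS lines n) [] [] (by simp)]
      simp [hLrev]
    by_cases hm1 : 1 ≤ maxp
    · have hA : (if (pvLoopRev maxp (pvRevS lines n) [] []).2 ≠ [] ∧
            ((pvLoopRev maxp (pvRevS lines n) [] []).1.length : Int) < maxp then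
            (pvLoopRev maxp (pvRevS lines n) [] []).1 ++
              [PySem.Str.strip (PySem.Str.join " " (pvLoopRev maxp (pvRevS lines n) [] []).2.reverse)]
          else (pvLoopRev maxp (pvRevS lines n) [] []).1)
          = ((pvSplitB S).reverse).take maxp.toNat := by
        have hc := pvcap maxp (by omega) (pvRevS lines n) [] [] (by simp; omega)

        simpa [hsplit] using hc
      rw [hA]
      by_cases hP : pvSplitB S = []
      · rw [if_pos (show ((pvSplitB S).reverse).take maxp.toNat = [] by simp [hP])]
        rw [if_neg (show ¬(1 ≤ maxp ∧ pvSplitB S ≠ []) from fun h => h.2 hP)]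
        exact pvfallback_eq lines n hn
      · have hk1 : 1 ≤ maxp.toNat := by omega
        have hrevne : (pvSplitB S).reverse ≠ [] := by simpa using hP
        rw [if_neg (by simp [List.take_eq_nil_iff, hrevne]; omega), if_pos ⟨hm1, hP⟩]
        rw [pvtake_reverse (pvSplitB S) maxp.toNat]
        have hneg : -maxp = -((maxp.toNat : Nat) : Int) := by omega
        rw [hneg, PySem.List.slice_from_neg_natCast (pvSplitB S) maxp.toNat (by omega)]
    · have hz : pvLoopRev maxp (pvRevS lines n) [] [] = ([], []) := pvLoopRev_nonpos maxp hm1 _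
      rw [hz]
      rw [if_pos (by simp), if_neg (show ¬(1 ≤ maxp ∧ pvSplitB S ≠ []) from fun h => hm1 h.1)]
      exact pvfallback_eq lines n hn
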